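-- pv_equiv track=rewrite | github.com/takapdayon/atcoder | abc/AtCoderBeginnerContest077/C.py | snukefestival
-- ===== SOURCE A (Python) =====
-- import bisect
--
-- def snukefestival(n , a , b , c):
--
--     ans = 0
--     a.sort()
--     b.sort()
--     c.sort()
--
--     for i in b:
--         ab = bisect.bisect_left(a , i)
--         cb = bisect.bisect_right(c , i)
--         ans += ab * (len(b) - cb)
--
--     return ans
-- ===== SOURCE B (Python) =====
-- def snukefestival(n, a, b, c):
--     # Two-pointer merge over sorted b instead of per-element binary searches.
--     # Like A, sorts a, b, c in place.
--     a.sort()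
--     b.sort()
--     c.sort()
--     nb = len(b)
--     ia = ic = 0
--     ans = 0
--     for bi in b:
--         while ia < len(a) and a[ia] < bi:
--             ia += 1
--         while ic < len(c) and c[ic] <= bi:
--             ic += 1
--         ans += ia * (nb - ic)
--     return ans
-- ===== Notes on version B (the rewrite author's own statement) =====
-- stated objective: alternative
-- what changed: Replaces the per-element bisect_left/bisect_right binary searches with a single monotone two-pointer sweep over sorted b that advances indices into sorted a and sorted c once overall.
import Mathlib
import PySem

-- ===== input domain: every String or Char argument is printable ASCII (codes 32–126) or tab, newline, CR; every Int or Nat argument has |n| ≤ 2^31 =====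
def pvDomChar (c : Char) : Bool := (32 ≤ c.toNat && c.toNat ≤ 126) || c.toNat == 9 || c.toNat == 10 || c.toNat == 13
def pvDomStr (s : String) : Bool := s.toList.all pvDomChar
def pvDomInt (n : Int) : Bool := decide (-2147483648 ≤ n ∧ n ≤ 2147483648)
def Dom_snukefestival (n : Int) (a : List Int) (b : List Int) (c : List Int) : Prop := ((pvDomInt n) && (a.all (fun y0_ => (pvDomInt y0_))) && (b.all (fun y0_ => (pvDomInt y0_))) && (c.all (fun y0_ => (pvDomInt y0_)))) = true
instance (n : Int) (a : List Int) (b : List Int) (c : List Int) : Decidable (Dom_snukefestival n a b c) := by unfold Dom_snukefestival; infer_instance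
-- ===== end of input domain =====

-- B replaces the per-element binary searches with one monotone two-pointer sweep
-- (alternative decomposition, same sort-dominated cost). Both A and B sort the
-- list arguments in place in Python; the equivalence proved here is about the
-- return value.

-- ===== PORT A =====
def snukefestival (n : Int) (a : List Int) (b : List Int) (c : List Int) : Int :=
  let a' := PySem.List.sorted a (fun x => x)
  let b' := PySem.List.sorted b (fun x => x)
  let c' := PySem.List.sorted c (fun x => x)
  b'.foldl (fun ans i =>
    let ab := PySem.List.bisectLeft a' i
    let cb := PySem.List.bisectRight c' i
    ans + (ab : Int) * ((b'.length : Int) - (cb : Int))) 0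

-- ===== PORT B =====
-- while ia < len(a) and a[ia] < bi: ia += 1
def pvAdvLt (xs : List Int) (i : Nat) (x : Int) : Nat :=
  if h : i < xs.length then
    if xs[i] < x then pvAdvLt xs (i + 1) x else i
  else i
termination_by xs.length - i

-- while ic < len(c) and c[ic] <= bi: ic += 1
def pvAdvLe (xs : List Int) (i : Nat) (x : Int) : Nat :=
  if h : i < xs.length then
    if xs[i] ≤ x then pvAdvLe xs (i + 1) x else i
  else i
termination_by xs.length - i

def snukefestival_alt (n : Int) (a : List Int) (b : List Int) (c : List Int) : Int :=
  let a' := PySem.List.sorted a (fun x => x)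
  let b' := PySem.List.sorted b (fun x => x)
  let c' := PySem.List.sorted c (fun x => x)
  let nb : Int := b'.length
  let r := b'.foldl (fun (s : Nat × Nat × Int) bi =>
      let ia := pvAdvLt a' s.1 bi
      let ic := pvAdvLe c' s.2.1 bi
      (ia, ic, s.2.2 + (ia : Int) * (nb - (ic : Int)))) (0, 0, 0)
  r.2.2

-- ===== PRECONDITION & SPEC =====
def Spec_snukefestival (n : Int) (a : List Int) (b : List Int) (c : List Int) (out : Int) : Prop := out = snukefestival_alt n a b c
instance (n : Int) (a : List Int) (b : List Int) (c : List Int) (out : Int) : Decidable (Spec_snukefestival n a b c out) := by unfold Spec_snukefestival; infer_instance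

-- ===== CLAIM (what is proved, stated in full; the proofs are below) =====
def Claim_equal_snukefestival : Prop := ∀ (n : Int) (a : List Int) (b : List Int) (c : List Int), Dom_snukefestival n a b c → Spec_snukefestival n a b c (snukefestival n a b c)

-- ===== LEMMAS AND PROOFS =====

-- The while loop started at any i ≤ bisectLeft lands exactly at bisectLeft (sorted xs).
theorem pvAdvLt_eq_bisectLeft (xs : List Int) (x : Int)
    (hs : List.Pairwise (fun x1 x2 => x1 ≤ x2) xs) :
    ∀ i, i ≤ PySem.List.bisectLeft xs x → pvAdvLt xs i x = PySem.List.bisectLeft xs x := by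
  obtain ⟨hlen, hlt, hge⟩ := PySem.List.bisectLeft_spec xs x hs
  intro i hi
  induction i using pvAdvLt.induct (xs := xs) (x := x) with
  | case1 i h hx ih =>
    rcases lt_or_eq_of_le hi with hi' | hi'
    · rw [pvAdvLt]; simp [h, hx]; exact ih hi'
    · exact absurd (hge i h (le_of_eq hi'.symm)) (not_le.mpr hx)
  | case2 i h hx =>
    rcases lt_or_eq_of_le hi with hi' | hi'
    · exact absurd (hlt i h hi') hx
    · subst hi'; rw [pvAdvLt]; simp [h, hx]
  | case3 i h =>
    have : PySem.List.bisectLeft xs x ≤ i := le_trans hlen (le_of_not_gt h)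
    rw [pvAdvLt]; simp [h]; omega

theorem pvAdvLe_eq_bisectRight (xs : List Int) (x : Int)
    (hs : List.Pairwise (fun x1 x2 => x1 ≤ x2) xs) :
    ∀ i, i ≤ PySem.List.bisectRight xs x → pvAdvLe xs i x = PySem.List.bisectRight xs x := by
  obtain ⟨hlen, hlt, hge⟩ := PySem.List.bisectRight_spec xs x hs
  intro i hi
  induction i using pvAdvLe.induct (xs := xs) (x := x) with
  | case1 i h hx ih =>
    rcases lt_or_eq_of_le hi with hi' | hi'
    · rw [pvAdvLe]; simp [h, hx]; exact ih hi'
    · exact absurd (hge i h (le_of_eq hi'.symm)) (not_lt.mpr hx)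
  | case2 i h hx =>
    rcases lt_or_eq_of_le hi with hi' | hi'
    · exact absurd (hlt i h hi') hx
    · subst hi'; rw [pvAdvLe]; simp [h, hx]
  | case3 i h =>
    have : PySem.List.bisectRight xs x ≤ i := le_trans hlen (le_of_not_gt h)
    rw [pvAdvLe]; simp [h]; omega

theorem bisectLeft_mono (xs : List Int) (x y : Int)
    (hs : List.Pairwise (fun x1 x2 => x1 ≤ x2) xs) (hxy : x ≤ y) :
    PySem.List.bisectLeft xs x ≤ PySem.List.bisectLeft xs y := by
  obtain ⟨hlenx, hltx, hgex⟩ := PySem.List.bisectLeft_spec xs x hs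
  obtain ⟨hleny, hlty, hgey⟩ := PySem.List.bisectLeft_spec xs y hs
  by_contra hc
  push Not at hc
  have hj : PySem.List.bisectLeft xs y < xs.length := lt_of_lt_of_le hc hlenx
  have h1 := hltx _ hj hc
  have h2 := hgey _ hj le_rfl
  omega

theorem bisectRight_mono (xs : List Int) (x y : Int)
    (hs : List.Pairwise (fun x1 x2 => x1 ≤ x2) xs) (hxy : x ≤ y) :
    PySem.List.bisectRight xs x ≤ PySem.List.bisectRight xs y := by
  obtain ⟨hlenx, hltx, hgex⟩ := PySem.List.bisectRight_spec xs x hs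
  obtain ⟨hleny, hlty, hgey⟩ := PySem.List.bisectRight_spec xs y hs
  by_contra hc
  push Not at hc
  have hj : PySem.List.bisectRight xs y < xs.length := lt_of_lt_of_le hc hlenx
  have h1 := hltx _ hj hc
  have h2 := hgey _ hj le_rfl
  omega

-- The two-pointer fold computes the same sum as the bisect fold, given that
-- both pointers start at or below the bisect positions for every element to come.
theorem fold_twoptr_eq (a' c' : List Int) (nb : Int)
    (ha : List.Pairwise (fun x1 x2 => x1 ≤ x2) a')
    (hc : List.Pairwise (fun x1 x2 => x1 ≤ x2) c') :
    ∀ (bs : List Int), List.Pairwise (fun x1 x2 => x1 ≤ x2) bs →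
    ∀ (ia ic : Nat) (ans : Int),
    (∀ bi ∈ bs, ia ≤ PySem.List.bisectLeft a' bi ∧ ic ≤ PySem.List.bisectRight c' bi) →
    (bs.foldl (fun (s : Nat × Nat × Int) bi =>
        let ia := pvAdvLt a' s.1 bi
        let ic := pvAdvLe c' s.2.1 bi
        (ia, ic, s.2.2 + (ia : Int) * (nb - (ic : Int)))) (ia, ic, ans)).2.2
      = bs.foldl (fun ans i =>
        let ab := PySem.List.bisectLeft a' i
        let cb := PySem.List.bisectRight c' i
        ans + (ab : Int) * (nb - (cb : Int))) ans := by
  intro bs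
  induction bs with
  | nil => intro _ ia ic ans _; rfl
  | cons bi bs ih =>
    intro hp ia ic ans hbound
    have hbi := hbound bi (List.mem_cons_self)
    have h1 := pvAdvLt_eq_bisectLeft a' bi ha ia hbi.1
    have h2 := pvAdvLe_eq_bisectRight c' bi hc ic hbi.2
    simp only [List.foldl_cons, h1, h2]
    exact ih (List.Pairwise.of_cons hp) _ _ _ (fun bj hbj => by
      have hle : bi ≤ bj := (List.pairwise_cons.mp hp).1 bj hbj
      exact ⟨bisectLeft_mono a' bi bj ha hle, bisectRight_mono c' bi bj hc hle⟩)

-- ===== VERDICT (by name: the statement is the Claim_ definition above) =====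
theorem snukefestival_spec : Claim_equal_snukefestival := by
  intro n a b c _
  unfold Spec_snukefestival snukefestival snukefestival_alt
  simp only []
  rw [fold_twoptr_eq _ _ _ (PySem.List.sorted_pairwise a (fun x => x))
      (PySem.List.sorted_pairwise c (fun x => x))
      _ (PySem.List.sorted_pairwise b (fun x => x))
      _ _ _ (fun bi _ => ⟨Nat.zero_le _, Nat.zero_le _⟩)]
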